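-- pv_equiv track=rewrite | github.com/WargaLab-Information-Systems/algoritma-pemrograman-1A-2025 | 250441100004_AchSyainulPratama_modul 6_KakYahya/modul6 soal2.py | gabung_tuple
-- ===== SOURCE A (Python) =====
-- def gabung_tuple(t1, t2):
--     gabung = list(t1) + list(t2)
--     hasil = []
--     for i in gabung:
--         if i not in hasil:
--             hasil.append(i)
--     # Urut manual descending
--     for i in range(len(hasil)):
--         for j in range(i + 1, len(hasil)):
--             if hasil[i] < hasil[j]:
--                 hasil[i], hasil[j] = hasil[j], hasil[i]
--     return tuple(hasil)
-- ===== SOURCE B (Python) =====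
-- def gabung_tuple(t1, t2):
--     merged = sorted(list(t1) + list(t2), reverse=True)
--     hasil = []
--     for x in merged:
--         if not hasil or hasil[-1] != x:
--             hasil.append(x)
--     return tuple(hasil)
-- ===== Notes on version B (the rewrite author's own statement) =====
-- stated objective: faster
-- what changed: B sorts the merged list once with sorted(reverse=True) and removes duplicates in a single adjacent-equality pass, replacing A's O(n^2) membership-scan dedup followed by an O(n^2) manual swap sort.
import Mathlib
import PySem

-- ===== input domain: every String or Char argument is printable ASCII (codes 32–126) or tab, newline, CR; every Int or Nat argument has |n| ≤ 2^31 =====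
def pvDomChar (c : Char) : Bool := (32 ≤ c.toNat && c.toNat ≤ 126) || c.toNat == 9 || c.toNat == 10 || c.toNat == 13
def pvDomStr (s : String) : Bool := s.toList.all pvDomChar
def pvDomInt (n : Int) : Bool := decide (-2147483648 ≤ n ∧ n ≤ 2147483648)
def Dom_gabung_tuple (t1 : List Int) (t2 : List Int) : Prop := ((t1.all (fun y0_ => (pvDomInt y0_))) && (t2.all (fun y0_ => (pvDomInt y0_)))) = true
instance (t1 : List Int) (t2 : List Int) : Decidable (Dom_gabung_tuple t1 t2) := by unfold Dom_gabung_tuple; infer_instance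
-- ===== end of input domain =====

-- B replaces A's O(n^2) membership-scan dedup + O(n^2) manual swap sort by one sorted(reverse=True) call followed by a linear adjacent-duplicate pass.

-- ===== PORT A =====
-- first-occurrence dedup: `for i in gabung: if i not in hasil: hasil.append(i)`
def pyDedup (xs : List Int) : List Int :=
  xs.foldl (fun acc i => if acc.contains i then acc else acc ++ [i]) []

-- one step of the manual sort: `if hasil[i] < hasil[j]: hasil[i], hasil[j] = hasil[j], hasil[i]`
def swapIf (h : List Int) (i j : Nat) : List Int :=
  if h.getD i 0 < h.getD j 0 then (h.set i (h.getD j 0)).set j (h.getD i 0) else h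

-- inner loop: `for j in range(i + 1, len(hasil))`
def innerLoop (h : List Int) (i : Nat) : List Int :=
  (List.range' (i + 1) (h.length - (i + 1))).foldl (fun h j => swapIf h i j) h

def gabung_tuple (t1 : List Int) (t2 : List Int) : List Int :=
  let gabung := t1 ++ t2
  let hasil := pyDedup gabung
  (List.range hasil.length).foldl (fun h i => innerLoop h i) hasil

-- ===== PORT B =====
-- `if not hasil or hasil[-1] != x: hasil.append(x)`
def adjStep (acc : List Int) (x : Int) : List Int :=
  if acc.isEmpty || acc.getLastD 0 != x then acc ++ [x] else acc

def gabung_tuple_alt (t1 : List Int) (t2 : List Int) : List Int :=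
  (PySem.List.sorted (t1 ++ t2) (fun x => x) true).foldl adjStep []

-- ===== PRECONDITION & SPEC =====
def Spec_gabung_tuple (t1 : List Int) (t2 : List Int) (out : List Int) : Prop := out = gabung_tuple_alt t1 t2
instance (t1 : List Int) (t2 : List Int) (out : List Int) : Decidable (Spec_gabung_tuple t1 t2 out) := by unfold Spec_gabung_tuple; infer_instance

-- ===== CLAIM (what is proved, stated in full; the proofs are below) =====
def Claim_equal_gabung_tuple : Prop := ∀ (t1 : List Int) (t2 : List Int), Dom_gabung_tuple t1 t2 → Spec_gabung_tuple t1 t2 (gabung_tuple t1 t2)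

-- ===== LEMMAS AND PROOFS =====

-- dedup fold: nodup result, members are those of the input
theorem pyDedup_go (xs : List Int) : ∀ (acc : List Int), acc.Nodup →
    (xs.foldl (fun acc i => if acc.contains i then acc else acc ++ [i]) acc).Nodup ∧
    (∀ y, y ∈ xs.foldl (fun acc i => if acc.contains i then acc else acc ++ [i]) acc ↔ (y ∈ acc ∨ y ∈ xs)) := by
  induction xs with
  | nil => intro acc h; simpa using h
  | cons x rest ih =>
    intro acc h
    simp only [List.foldl_cons]
    by_cases hx : x ∈ acc
    · have hc : acc.contains x = true := by simpa using hx
      rw [if_pos hc]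
      obtain ⟨h1, h2⟩ := ih acc h
      refine ⟨h1, fun y => ?_⟩
      rw [h2]
      constructor
      · rintro (hy | hy) <;> simp [hy]
      · rintro (hy | hy)
        · exact Or.inl hy
        · rcases List.mem_cons.mp hy with rfl | hy
          · exact Or.inl hx
          · exact Or.inr hy
    · rw [if_neg (by simpa using hx)]
      have hnd : (acc ++ [x]).Nodup := by
        simp [List.nodup_append, h]
        exact fun a ha he => hx (he ▸ ha)
      obtain ⟨h1, h2⟩ := ih (acc ++ [x]) hnd
      refine ⟨h1, fun y => ?_⟩
      rw [h2]
      simp [or_assoc, List.mem_cons]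

theorem pyDedup_nodup (xs : List Int) : (pyDedup xs).Nodup := (pyDedup_go xs [] (by simp)).1

theorem mem_pyDedup (xs : List Int) (y : Int) : y ∈ pyDedup xs ↔ y ∈ xs := by
  have := (pyDedup_go xs [] (by simp)).2 y
  simpa [pyDedup] using this

-- swapIf basics
theorem swapIf_length (h : List Int) (i j : Nat) : (swapIf h i j).length = h.length := by
  unfold swapIf; split <;> simp

theorem getD_set (l : List Int) (i : Nat) (a : Int) (q : Nat) :
    (l.set i a).getD q 0 = if i = q ∧ q < l.length then a else l.getD q 0 := by
  simp only [List.getD, List.getElem?_set]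
  by_cases h1 : i = q
  · subst h1
    by_cases h2 : i < l.length
    · simp [h2]
    · simp [h2]
  · simp [h1]

theorem swapIf_getD_ne (h : List Int) (i j q : Nat) (h1 : q ≠ i) (h2 : q ≠ j) :
    (swapIf h i j).getD q 0 = h.getD q 0 := by
  unfold swapIf; split
  · simp only [getD_set, List.length_set]
    split_ifs <;> omega
  · rfl

theorem swapIf_getD_i_ge (h : List Int) (i j : Nat) (_hi : i < h.length) (_hj : j < h.length) (_hij : i ≠ j) :
    h.getD i 0 ≤ (swapIf h i j).getD i 0 := by
  unfold swapIf; split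
  · rename_i hlt
    simp only [getD_set, List.length_set]
    split_ifs <;> omega
  · exact le_refl _

theorem swapIf_getD_i_ge_j (h : List Int) (i j : Nat) (_hi : i < h.length) (_hj : j < h.length) (hij : i ≠ j) :
    (swapIf h i j).getD j 0 ≤ (swapIf h i j).getD i 0 := by
  unfold swapIf; split
  · rename_i hlt
    simp only [getD_set, List.length_set]
    split_ifs <;> first | omega | simp_all
  · rename_i hlt
    omega

theorem swapIf_perm (h : List Int) (i j : Nat) (hi : i < h.length) (hj : j < h.length) (hij : i ≠ j) :
    (swapIf h i j).Perm h := by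
  unfold swapIf; split
  · rw [List.perm_iff_count]
    intro c
    have hj' : j < (h.set i (h.getD j 0)).length := by simpa using hj
    rw [List.count_set hj', List.count_set hi]
    have hgj : (h.set i (h.getD j 0))[j]'hj' = h[j]'hj := by
      rw [List.getElem_set]; simp [hij]
    rw [hgj, List.getD_eq_getElem h 0 hi, List.getD_eq_getElem h 0 hj]
    have hci : (h[i]'hi == c) = true → 1 ≤ h.count c := by
      intro hb
      have : c ∈ h := by
        have := List.getElem_mem hi
        rwa [eq_of_beq hb] at this
      exact List.count_pos_iff.mpr this
    have hcj : (h[j]'hj == c) = true → 1 ≤ h.count c := by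
      intro hb
      have : c ∈ h := by
        have := List.getElem_mem hj
        rwa [eq_of_beq hb] at this
      exact List.count_pos_iff.mpr this
    by_cases b1 : (h[i]'hi == c) = true <;> by_cases b2 : (h[j]'hj == c) = true
    · have hb := hci b1; simp [b1, b2]; omega
    · have hb := hci b1; simp [b1, b2]; omega
    · have hb := hcj b2; simp [b1, b2]
    · simp [b1, b2]
  · exact List.Perm.refl _

theorem inner_go (s : Nat) : ∀ (js : List Nat) (h : List Int),
    s < h.length → (∀ j ∈ js, s < j ∧ j < h.length) → js.Nodup →
    (js.foldl (fun h j => swapIf h s j) h).length = h.length ∧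
    (js.foldl (fun h j => swapIf h s j) h).Perm h ∧
    (∀ q, q ≠ s → q ∉ js → (js.foldl (fun h j => swapIf h s j) h).getD q 0 = h.getD q 0) ∧
    (∀ j ∈ js, (js.foldl (fun h j => swapIf h s j) h).getD j 0 ≤ (js.foldl (fun h j => swapIf h s j) h).getD s 0) ∧
    (h.getD s 0 ≤ (js.foldl (fun h j => swapIf h s j) h).getD s 0) := by
  intro js
  induction js with
  | nil => intro h hs _ _; exact ⟨rfl, List.Perm.refl _, fun _ _ _ => rfl, by simp, le_refl _⟩
  | cons j rest ih =>
    intro h hs hjs hnd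
    obtain ⟨hsj, hjlen⟩ := hjs j (by simp)
    have hij : s ≠ j := by omega
    have h1len : (swapIf h s j).length = h.length := swapIf_length h s j
    simp only [List.foldl_cons]
    obtain ⟨ihlen, ihperm, ihunch, ihdom, ihmono⟩ :=
      ih (swapIf h s j) (by omega)
        (fun j' hj' => ⟨(hjs j' (by simp [hj'])).1, by rw [h1len]; exact (hjs j' (by simp [hj'])).2⟩)
        (List.Nodup.of_cons hnd)
    have hjrest : j ∉ rest := by simp [List.nodup_cons] at hnd; exact hnd.1
    refine ⟨by rw [ihlen, h1len], ihperm.trans (swapIf_perm h s j hs hjlen hij), ?_, ?_, ?_⟩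
    · intro q hq hqm
      rw [ihunch q hq (by simp at hqm; exact hqm.2)]
      exact swapIf_getD_ne h s j q hq (by simp at hqm; exact hqm.1)
    · intro j' hj'
      rcases List.mem_cons.mp hj' with rfl | hj'
      · -- head: value at j unchanged by rest, ≤ (swapIf)[s] ≤ final [s]
        rw [ihunch j' (Ne.symm hij) hjrest]
        exact le_trans (swapIf_getD_i_ge_j h s j' hs hjlen hij) ihmono
      · exact ihdom j' hj'
    · exact le_trans (swapIf_getD_i_ge h s j hs hjlen hij) ihmono

theorem innerLoop_spec (h : List Int) (s : Nat) (hs : s < h.length) :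
    (innerLoop h s).length = h.length ∧
    (innerLoop h s).Perm h ∧
    (∀ q, q < s → (innerLoop h s).getD q 0 = h.getD q 0) ∧
    (∀ j, s < j → j < h.length → (innerLoop h s).getD j 0 ≤ (innerLoop h s).getD s 0) := by
  have hmem : ∀ j ∈ List.range' (s + 1) (h.length - (s + 1)), s < j ∧ j < h.length := by
    intro j hj
    rw [List.mem_range'_1] at hj
    omega
  obtain ⟨l, p, u, d, m⟩ := inner_go s (List.range' (s + 1) (h.length - (s + 1))) h hs hmem (List.nodup_range' ..)
  refine ⟨l, p, ?_, ?_⟩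
  · intro q hq
    exact u q (by omega) (by rw [List.mem_range'_1]; omega)
  · intro j hj hjlen
    exact d j (by rw [List.mem_range'_1]; omega)

-- suffix values of innerLoop come from suffix values of the input
theorem innerLoop_suffix (h : List Int) (s : Nat) (hs : s < h.length) (q : Nat)
    (hq : s ≤ q) (hqlen : q < h.length) :
    ∃ m, s ≤ m ∧ m < h.length ∧ (innerLoop h s).getD q 0 = h.getD m 0 := by
  obtain ⟨hlen, hperm, hunch, _⟩ := innerLoop_spec h s hs
  have hql : q < (innerLoop h s).length := by omega
  -- the prefixes below s agree, so the suffixes are permutations of each other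
  have htake : (innerLoop h s).take s = h.take s := by
    apply List.ext_getElem
    · simp; omega
    · intro n h1 h2
      rw [List.getElem_take, List.getElem_take]
      have hn : n < s := by simp at h1; omega
      have := hunch n hn
      rw [List.getD_eq_getElem _ 0 (by omega), List.getD_eq_getElem _ 0 (by omega)] at this
      exact this
  have hdrop : ((innerLoop h s).drop s).Perm (h.drop s) := by
    have e1 : (innerLoop h s).take s ++ (innerLoop h s).drop s = innerLoop h s := List.take_append_drop ..
    have e2 : h.take s ++ h.drop s = h := List.take_append_drop ..
    have : (h.take s ++ (innerLoop h s).drop s).Perm (h.take s ++ h.drop s) := by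
      rw [e2, ← htake, e1]; exact hperm
    exact (List.perm_append_left_iff _).mp this
  have hmem : (innerLoop h s).getD q 0 ∈ (innerLoop h s).drop s := by
    have e1 : ((innerLoop h s).drop s)[q - s]? = (innerLoop h s)[q]? := by
      rw [List.getElem?_drop]
      congr 1
      omega
    have e2 : (innerLoop h s)[q]? = some ((innerLoop h s).getD q 0) := by
      rw [List.getElem?_eq_getElem hql, List.getD_eq_getElem _ 0 hql]
    exact List.mem_of_getElem? (e1.trans e2)
  have hmem2 : (innerLoop h s).getD q 0 ∈ h.drop s := hdrop.mem_iff.mp hmem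
  obtain ⟨n, hn, he⟩ := List.mem_iff_getElem.mp hmem2
  refine ⟨s + n, by omega, by simp at hn; omega, ?_⟩
  rw [List.getD_eq_getElem h 0 (by simp at hn; omega), ← he]
  exact List.getElem_drop

theorem outer_go : ∀ (k s : Nat) (h : List Int), s + k = h.length →
    (∀ p q, p < s → p < q → q < h.length → h.getD q 0 ≤ h.getD p 0) →
    ((List.range' s k).foldl (fun h i => innerLoop h i) h).Perm h ∧
    (∀ p q, p < q → q < ((List.range' s k).foldl (fun h i => innerLoop h i) h).length →
      ((List.range' s k).foldl (fun h i => innerLoop h i) h).getD q 0 ≤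
      ((List.range' s k).foldl (fun h i => innerLoop h i) h).getD p 0) := by
  intro k
  induction k with
  | zero =>
    intro s h hlen hpre
    refine ⟨List.Perm.refl _, fun p q hpq hq => ?_⟩
    simp at hq
    exact hpre p q (by omega) hpq (by omega)
  | succ k ih =>
    intro s h hlen hpre
    have hs : s < h.length := by omega
    obtain ⟨h1len, h1perm, h1unch, h1dom⟩ := innerLoop_spec h s hs
    have hsuffix : ∀ q, s ≤ q → q < h.length → ∀ p, p < s →
        (innerLoop h s).getD q 0 ≤ h.getD p 0 := by
      intro q hq hqlen p hp
      obtain ⟨m, hm1, hm2, he⟩ := innerLoop_suffix h s hs q hq hqlen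
      rw [he]
      exact hpre p m hp (by omega) hm2
    have hpre' : ∀ p q, p < s + 1 → p < q → q < (innerLoop h s).length →
        (innerLoop h s).getD q 0 ≤ (innerLoop h s).getD p 0 := by
      intro p q hp hpq hq
      rw [h1len] at hq
      by_cases hps : p < s
      · rw [h1unch p hps]
        by_cases hqs : q < s
        · rw [h1unch q hqs]; exact hpre p q hps hpq hq
        · exact hsuffix q (by omega) hq p hps
      · have hpe : p = s := by omega
        subst hpe
        exact h1dom q (by omega) hq
    rw [List.range'_succ, List.foldl_cons]
    obtain ⟨rperm, rsort⟩ := ih (s + 1) (innerLoop h s) (by omega) hpre'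
    exact ⟨rperm.trans h1perm, rsort⟩

-- full A-side characterisation: result is a ≥-sorted permutation of pyDedup
theorem gabung_tuple_char (t1 t2 : List Int) :
    (gabung_tuple t1 t2).Perm (pyDedup (t1 ++ t2)) ∧
    (∀ p q, p < q → q < (gabung_tuple t1 t2).length →
      (gabung_tuple t1 t2).getD q 0 ≤ (gabung_tuple t1 t2).getD p 0) := by
  have := outer_go (pyDedup (t1 ++ t2)).length 0 (pyDedup (t1 ++ t2)) (by omega) (by omega)
  rw [← List.range_eq_range'] at this
  exact this

-- pairwise strict descending from ≥-sorted + Nodup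
theorem pairwise_gt_of_sorted_nodup (l : List Int)
    (hsort : ∀ p q, p < q → q < l.length → l.getD q 0 ≤ l.getD p 0)
    (hnd : l.Nodup) : List.Pairwise (fun a b => b < a) l := by
  rw [List.pairwise_iff_getElem]
  intro i j hi hj hij
  have hle := hsort i j hij hj
  rw [List.getD_eq_getElem _ 0 hi, List.getD_eq_getElem _ 0 hj] at hle
  have hne : l[i] ≠ l[j] := by
    intro he
    exact absurd (List.Nodup.getElem_inj_iff hnd |>.mp he) (by omega)
  omega

-- ===== B-side lemmas =====

theorem getLastD_mem (l : List Int) (hl : l ≠ []) : l.getLastD 0 ∈ l := by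
  rw [List.getLastD_eq_getLast?, List.getLast?_eq_some_getLast hl]
  simp only [Option.getD_some]
  exact List.getLast_mem hl

theorem getLastD_min (acc : List Int) : List.Pairwise (fun a b => b < a) acc → ∀ a ∈ acc, acc.getLastD 0 ≤ a := by
  induction acc with
  | nil => intro _ a ha; simp at ha
  | cons y ys ih =>
    intro hp a ha
    by_cases hys : ys = []
    · subst hys
      simp at ha
      subst ha
      simp
    · have hlast : (y :: ys).getLastD 0 = ys.getLastD 0 := by
        rw [List.getLastD_cons, List.getLastD_eq_getLast?, List.getLastD_eq_getLast?,
          List.getLast?_eq_some_getLast hys]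
        simp
      rw [hlast]
      rcases List.mem_cons.mp ha with rfl | ha
      · have h1 := (List.pairwise_cons.mp hp).1 (ys.getLastD 0) (getLastD_mem ys hys)
        omega
      · exact ih (List.Pairwise.of_cons hp) a ha

theorem isEmpty_false_of_ne_nil (l : List Int) (hl : l ≠ []) : l.isEmpty = false := by
  cases l with
  | nil => exact absurd rfl hl
  | cons a as => rfl

theorem adj_go : ∀ (xs acc : List Int),
    List.Pairwise (fun a b => b ≤ a) xs →
    List.Pairwise (fun a b => b < a) acc →
    (∀ x ∈ xs, ∀ a ∈ acc, x ≤ a) →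
    List.Pairwise (fun a b => b < a) (xs.foldl adjStep acc) ∧
    (∀ y, y ∈ xs.foldl adjStep acc ↔ (y ∈ acc ∨ y ∈ xs)) := by
  intro xs
  induction xs with
  | nil => intro acc _ hacc _; exact ⟨hacc, by simp⟩
  | cons x rest ih =>
    intro acc hxs hacc hcond
    simp only [List.foldl_cons]
    have hxrest : ∀ z ∈ rest, z ≤ x := fun z hz => (List.pairwise_cons.mp hxs).1 z hz
    by_cases hemp : acc = []
    · subst hemp
      have hstep : adjStep [] x = [x] := by simp [adjStep]
      rw [hstep]
      obtain ⟨p1, p2⟩ := ih [x] (List.Pairwise.of_cons hxs) (by simp)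
        (fun z hz a ha => by
          rcases List.mem_cons.mp ha with rfl | h
          · exact hxrest z hz
          · simp at h)
      refine ⟨p1, fun y => ?_⟩
      rw [p2]
      simp
    · have he1 : acc.isEmpty = false := isEmpty_false_of_ne_nil acc hemp
      have hxlast : x ≤ acc.getLastD 0 := hcond x (by simp) _ (getLastD_mem acc hemp)
      by_cases heq : acc.getLastD 0 = x
      · have he2 : acc.getLast?.getD 0 = x := by
          rw [← List.getLastD_eq_getLast?]
          exact heq
        have hstep : adjStep acc x = acc := by
          simp [adjStep, he1, he2]
        rw [hstep]
        obtain ⟨p1, p2⟩ := ih acc (List.Pairwise.of_cons hxs) hacc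
          (fun z hz a ha => hcond z (by simp [hz]) a ha)
        refine ⟨p1, fun y => ?_⟩
        rw [p2]
        constructor
        · rintro (hy | hy) <;> simp [hy]
        · rintro (hy | hy)
          · exact Or.inl hy
          · rcases List.mem_cons.mp hy with rfl | hy
            · left
              rw [← heq]
              exact getLastD_mem acc hemp
            · exact Or.inr hy
      · have he2 : ¬ acc.getLast?.getD 0 = x := by
          rw [← List.getLastD_eq_getLast?]
          exact heq
        have hstep : adjStep acc x = acc ++ [x] := by
          simp [adjStep, he1, he2]
        rw [hstep]
        have hxlt : ∀ a ∈ acc, x < a := by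
          intro a ha
          have h1 := getLastD_min acc hacc a ha
          omega
        have hacc2 : List.Pairwise (fun a b => b < a) (acc ++ [x]) := by
          rw [List.pairwise_append]
          exact ⟨hacc, by simp, by simpa using hxlt⟩
        obtain ⟨p1, p2⟩ := ih (acc ++ [x]) (List.Pairwise.of_cons hxs) hacc2
          (fun z hz a ha => by
            rcases List.mem_append.mp ha with h | h
            · exact hcond z (by simp [hz]) a h
            · simp at h
              subst h
              exact hxrest z hz)
        refine ⟨p1, fun y => ?_⟩
        rw [p2]
        simp [or_assoc]

theorem gabung_tuple_alt_char (t1 t2 : List Int) :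
    List.Pairwise (fun a b => b < a) (gabung_tuple_alt t1 t2) ∧
    (∀ y, y ∈ gabung_tuple_alt t1 t2 ↔ y ∈ t1 ++ t2) := by
  have hsorted : List.Pairwise (fun a b : Int => b ≤ a) (PySem.List.sorted (t1 ++ t2) (fun x => x) true) :=
    PySem.List.sorted_pairwise_rev ..
  obtain ⟨p1, p2⟩ := adj_go (PySem.List.sorted (t1 ++ t2) (fun x => x) true) [] hsorted (by simp) (by simp)
  refine ⟨p1, fun y => ?_⟩
  rw [show gabung_tuple_alt t1 t2 = (PySem.List.sorted (t1 ++ t2) (fun x => x) true).foldl adjStep [] from rfl, p2]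
  simp [PySem.List.mem_sorted]

-- ===== assembling the verdict =====

theorem main_eq (t1 t2 : List Int) : gabung_tuple t1 t2 = gabung_tuple_alt t1 t2 := by
  obtain ⟨haperm, hasort⟩ := gabung_tuple_char t1 t2
  obtain ⟨hbpair, hbmem⟩ := gabung_tuple_alt_char t1 t2
  have hand : (gabung_tuple t1 t2).Nodup := haperm.nodup_iff.mpr (pyDedup_nodup _)
  have hapair : List.Pairwise (fun a b => b < a) (gabung_tuple t1 t2) :=
    pairwise_gt_of_sorted_nodup _ hasort hand
  have hbnd : (gabung_tuple_alt t1 t2).Nodup :=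
    hbpair.imp (fun h => by omega)
  have hbperm : (gabung_tuple_alt t1 t2).Perm (pyDedup (t1 ++ t2)) := by
    rw [List.perm_ext_iff_of_nodup hbnd (pyDedup_nodup _)]
    intro a
    rw [hbmem a, mem_pyDedup]
  have e1 : PySem.List.sorted (pyDedup (t1 ++ t2)) (fun x => x) true = gabung_tuple t1 t2 :=
    PySem.List.sorted_rev_eq_of_perm_of_pairwise_gt _ _ _ haperm hapair
  have e2 : PySem.List.sorted (pyDedup (t1 ++ t2)) (fun x => x) true = gabung_tuple_alt t1 t2 :=
    PySem.List.sorted_rev_eq_of_perm_of_pairwise_gt _ _ _ hbperm hbpair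
  rw [← e1, e2]

-- ===== VERDICT (by name: the statement is the Claim_ definition above) =====
theorem gabung_tuple_spec : Claim_equal_gabung_tuple := by
  intro t1 t2 _
  unfold Spec_gabung_tuple
  exact main_eq t1 t2
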